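-- pv_equiv track=rewrite | github.com/Tosha1409/Codilitychallenges | Silver2020.py | solution
-- ===== SOURCE A (Python) =====
-- def solution(A, B):
--     #adding rectangle if it is matches.
--     def update_results(number):
--         if not (number in results): results[number]=1
--         else: results[number]+=1
--
--     #checking all rectangles.
--     results = {}
--     for rectangle in range(len(A)):
--         update_results(A[rectangle])
--         if A[rectangle]!=B[rectangle]:
--             update_results(B[rectangle])
--
--     return max(list(results.values()))
-- ===== SOURCE B (Python) =====
-- def solution(A, B):
--     items = []
--     for a, b in zip(A, B):
--         items.append(a)
--         if a != b:
--             items.append(b)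
--     items.sort()
--     best = 0
--     run = 0
--     prev = None
--     for x in items:
--         if run > 0 and x == prev:
--             run += 1
--         else:
--             run = 1
--         if run > best:
--             best = run
--         prev = x
--     return best
-- ===== Notes on version B (the rewrite author's own statement) =====
-- stated objective: alternative
-- what changed: Replaces the hash-dict frequency counting with sort-then-scan: the collected values are sorted and the mode is found as the longest run of consecutive equal elements in one linear pass, with no dictionary at all.
import Mathlib
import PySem

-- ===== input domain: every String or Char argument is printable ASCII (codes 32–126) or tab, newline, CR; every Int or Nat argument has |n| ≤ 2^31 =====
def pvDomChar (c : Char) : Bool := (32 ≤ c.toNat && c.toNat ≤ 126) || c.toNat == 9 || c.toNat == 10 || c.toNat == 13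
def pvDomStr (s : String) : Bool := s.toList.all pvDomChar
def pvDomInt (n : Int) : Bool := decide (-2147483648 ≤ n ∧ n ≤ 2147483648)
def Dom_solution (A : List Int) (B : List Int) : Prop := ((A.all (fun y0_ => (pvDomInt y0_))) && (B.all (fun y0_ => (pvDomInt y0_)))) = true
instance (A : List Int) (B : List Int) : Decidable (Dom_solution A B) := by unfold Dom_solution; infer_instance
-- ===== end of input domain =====

-- B replaces A's hash-dict frequency counting by sort-then-scan (longest run of consecutive
-- equal elements after sorting); alternative algorithm, no speed claim.

-- ===== PORT A =====
-- the inner closure update_results(number), with the dict passed explicitly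
def updateResults (d : PySem.Dict Int Int) (n : Int) : PySem.Dict Int Int :=
  if d.contains n = false then d.insert n 1 else d.insert n (d.getD n 0 + 1)

def solution (A : List Int) (B : List Int) : Int :=
  let results := (PySem.List.pyRange 0 (A.length : Int) 1).foldl
    (fun d i =>
      let d1 := updateResults d (PySem.List.pyGetD A i 0)
      if PySem.List.pyGetD A i 0 ≠ PySem.List.pyGetD B i 0 then
        updateResults d1 (PySem.List.pyGetD B i 0)
      else d1)
    PySem.Dict.empty
  match PySem.List.max? results.values (fun x => x) with
  | some m => m
  | none => 0

-- ===== PORT B =====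
-- the body of B's scan loop: state (best, run, prev)
def pvStep (s : Int × Int × Option Int) (x : Int) : Int × Int × Option Int :=
  let run := if s.2.1 > 0 ∧ s.2.2 = some x then s.2.1 + 1 else 1
  let best := if run > s.1 then run else s.1
  (best, run, some x)

def solution_alt (A : List Int) (B : List Int) : Int :=
  let items := (A.zip B).foldl
    (fun acc (p : Int × Int) =>
      let acc := acc ++ [p.1]
      if p.1 ≠ p.2 then acc ++ [p.2] else acc) []
  let ys := PySem.List.sorted items (fun x => x) false
  (ys.foldl pvStep ((0 : Int), (0 : Int), (none : Option Int))).1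

-- ===== PRECONDITION & SPEC =====
-- Python A raises ValueError (max of empty) when A is empty and IndexError when len(B) < len(A)
def Pre_solution (A : List Int) (B : List Int) : Prop := A ≠ [] ∧ A.length ≤ B.length
instance (A : List Int) (B : List Int) : Decidable (Pre_solution A B) := by unfold Pre_solution; infer_instance
def pvWitness_solution : List Int × List Int := ([1, 2, 1], [2, 2, 3])

def Spec_solution (A : List Int) (B : List Int) (out : Int) : Prop := out = solution_alt A B
instance (A : List Int) (B : List Int) (out : Int) : Decidable (Spec_solution A B out) := by unfold Spec_solution; infer_instance

-- ===== CLAIM (what is proved, stated in full; the proofs are below) =====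
def Claim_equal_solution : Prop := ∀ (A : List Int) (B : List Int), Dom_solution A B → Pre_solution A B → Spec_solution A B (solution A B)

-- ===== LEMMAS AND PROOFS =====

-- the one or two values contributed at one index
def pvPiece (p : Int × Int) : List Int := p.1 :: (if p.1 ≠ p.2 then [p.2] else [])

def pvCnt (zs : List Int) (k : Int) : Int := (zs.count k : Int)

-- max frequency of zs (0 for empty)
def pvM (zs : List Int) : Int := (zs.map (pvCnt zs)).foldl max 0

theorem pv_maxfold_eq {l l' : List Int} (a : Int)
    (h1 : ∀ x ∈ l, x ∈ l' ∨ x ≤ a) (h2 : ∀ x ∈ l', x ∈ l ∨ x ≤ a) :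
    l.foldl max a = l'.foldl max a := by
  apply le_antisymm
  · rcases PySem.List.foldl_max_mem l a with h | h
    · rw [h]; exact (PySem.List.le_foldl_max l' a).1
    · rcases h1 _ h with hm | hle
      · exact (PySem.List.le_foldl_max l' a).2 _ hm
      · exact le_trans hle (PySem.List.le_foldl_max l' a).1
  · rcases PySem.List.foldl_max_mem l' a with h | h
    · rw [h]; exact (PySem.List.le_foldl_max l a).1
    · rcases h2 _ h with hm | hle
      · exact (PySem.List.le_foldl_max l a).2 _ hm
      · exact le_trans hle (PySem.List.le_foldl_max l a).1

theorem pv_foldl_max_init (l : List Int) (a b : Int) :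
    l.foldl max (max a b) = max a (l.foldl max b) := by
  induction l generalizing b with
  | nil => rfl
  | cons y t ih => simpa [max_assoc] using ih (max b y)

theorem pvM_nonneg (zs : List Int) : 0 ≤ pvM zs :=
  (PySem.List.le_foldl_max (zs.map (pvCnt zs)) 0).1

theorem pvCnt_pos {zs : List Int} {k : Int} (h : k ∈ zs) : 1 ≤ pvCnt zs k := by
  unfold pvCnt
  exact_mod_cast List.one_le_count_iff.mpr h

theorem pvM_cons (x : Int) (t : List Int) :
    pvM (x :: t) = max (pvCnt (x :: t) x) (pvM (t.filter (fun y => y ≠ x))) := by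
  have hc : 1 ≤ pvCnt (x :: t) x := pvCnt_pos (List.mem_cons_self)
  have h0 : max (0 : Int) (pvCnt (x :: t) x) = pvCnt (x :: t) x := by omega
  unfold pvM
  rw [List.map_cons, List.foldl_cons, h0]
  have hrhs : max (pvCnt (x :: t) x) ((t.filter (fun y => y ≠ x)).map (pvCnt (t.filter (fun y => y ≠ x))) |>.foldl max 0)
      = ((t.filter (fun y => y ≠ x)).map (pvCnt (t.filter (fun y => y ≠ x)))).foldl max (pvCnt (x :: t) x) := by
    rw [← pv_foldl_max_init]
    congr 1
    omega
  rw [hrhs]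
  apply pv_maxfold_eq
  · intro v hv
    rcases List.mem_map.mp hv with ⟨k, hk, rfl⟩
    by_cases hkx : k = x
    · subst hkx; right; exact le_refl _
    · left
      apply List.mem_map.mpr
      refine ⟨k, ?_, ?_⟩
      · simp [List.mem_filter, hk, hkx]
      · unfold pvCnt
        have h1 : List.count k (List.filter (fun y => decide (y ≠ x)) t) = List.count k t :=
          List.count_filter (by simp [hkx])
        have h2 : List.count k (x :: t) = List.count k t := List.count_cons_of_ne (Ne.symm hkx)
        rw [h1, h2]
  · intro v hv
    rcases List.mem_map.mp hv with ⟨k, hk, rfl⟩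
    have hk' := List.mem_filter.mp hk
    have hkx : k ≠ x := by simpa using hk'.2
    left
    apply List.mem_map.mpr
    refine ⟨k, hk'.1, ?_⟩
    unfold pvCnt
    have h1 : List.count k (List.filter (fun y => decide (y ≠ x)) t) = List.count k t :=
      List.count_filter (by simp [hkx])
    have h2 : List.count k (x :: t) = List.count k t := List.count_cons_of_ne (Ne.symm hkx)
    rw [h2, h1]

theorem pvM_perm {zs zs' : List Int} (h : zs.Perm zs') : pvM zs = pvM zs' := by
  unfold pvM
  apply pv_maxfold_eq
  · intro v hv
    rcases List.mem_map.mp hv with ⟨k, hk, rfl⟩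
    left
    apply List.mem_map.mpr
    exact ⟨k, h.mem_iff.mp hk, by unfold pvCnt; rw [h.count_eq]⟩
  · intro v hv
    rcases List.mem_map.mp hv with ⟨k, hk, rfl⟩
    left
    apply List.mem_map.mpr
    exact ⟨k, h.mem_iff.mpr hk, by unfold pvCnt; rw [h.count_eq]⟩

theorem pv_scan (t : List Int) : ∀ (p b r : Int),
    List.Pairwise (· ≤ ·) (p :: t) → 1 ≤ r → r ≤ b →
    (t.foldl pvStep (b, r, some p)).1
      = max b (max (r + pvCnt t p) (pvM (t.filter (fun y => y ≠ p)))) := by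
  induction t with
  | nil =>
    intro p b r _ h1 h2
    simp only [List.foldl_nil, List.filter_nil]
    have : pvCnt [] p = 0 := by unfold pvCnt; simp
    have hM : pvM ([] : List Int) = 0 := rfl
    rw [this, hM]; omega
  | cons x t ih =>
    intro p b r hpair h1 h2
    have hpx : p ≤ x := (List.pairwise_cons.mp hpair).1 x List.mem_cons_self
    have hpt : ∀ y ∈ t, p ≤ y := fun y hy => (List.pairwise_cons.mp hpair).1 y (List.mem_cons_of_mem _ hy)
    have hxt : List.Pairwise (· ≤ ·) (x :: t) := (List.pairwise_cons.mp hpair).2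
    have hxall : ∀ y ∈ t, x ≤ y := (List.pairwise_cons.mp hxt).1
    rw [List.foldl_cons]
    by_cases hx : p = x
    · subst hx
      have hstep : pvStep (b, r, some p) p = (max b (r + 1), r + 1, some p) := by
        simp only [pvStep]
        have hr : (0 : Int) < r := by omega
        simp [hr]
        split_ifs <;> omega
      rw [hstep, ih p (max b (r + 1)) (r + 1)
        (List.pairwise_cons.mpr ⟨hpt, (List.pairwise_cons.mp hxt).2⟩) (by omega) (by omega)]
      have hcnt : pvCnt (p :: t) p = pvCnt t p + 1 := by
        unfold pvCnt; rw [List.count_cons_self]; push_cast; ring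
      have hfil : (p :: t).filter (fun y => y ≠ p) = t.filter (fun y => y ≠ p) := by
        simp
      rw [hcnt, hfil]
      have hcpos : 0 ≤ pvCnt t p := by unfold pvCnt; positivity
      omega
    · have hstep : pvStep (b, r, some p) x = (b, 1, some x) := by
        unfold pvStep
        have : ((some p : Option Int) = some x) = False := by simp [hx]
        simp only [this, and_false, if_false]
        have : (if (1 : Int) > b then (1 : Int) else b) = b := by omega
        simp [this]
      rw [hstep, ih x b 1 hxt (by omega) (by omega)]
      have hplt : p < x := lt_of_le_of_ne hpx hx
      have hnp : p ∉ x :: t := by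
        intro hmem
        rcases List.mem_cons.mp hmem with h | h
        · exact hx h
        · exact absurd (hxall p h) (by omega)
      have hcnt0 : pvCnt (x :: t) p = 0 := by
        unfold pvCnt; rw [List.count_eq_zero.mpr hnp]; rfl
      have hfil : (x :: t).filter (fun y => y ≠ p) = x :: t := by
        apply List.filter_eq_self.mpr
        intro y hy
        rcases List.mem_cons.mp hy with h | h
        · subst h; simp; omega
        · have := hxall y h; simp; omega
      rw [hcnt0, hfil, pvM_cons]
      have hcx : pvCnt (x :: t) x = 1 + pvCnt t x := by
        unfold pvCnt; rw [List.count_cons_self]; push_cast; ring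
      rw [hcx]
      omega

-- full scan of a nonempty sorted list computes its max frequency
theorem pv_scan_sorted (ys : List Int) (hp : List.Pairwise (· ≤ ·) ys) (hne : ys ≠ []) :
    (ys.foldl pvStep ((0 : Int), (0 : Int), (none : Option Int))).1 = pvM ys := by
  match ys, hne with
  | y0 :: t, _ =>
    have hstep : pvStep ((0 : Int), (0 : Int), (none : Option Int)) y0 = (1, 1, some y0) := by
      unfold pvStep; norm_num
    rw [List.foldl_cons, hstep, pv_scan t y0 1 1 hp (le_refl _) (le_refl _), pvM_cons]
    have hc : 1 ≤ pvCnt (y0 :: t) y0 := pvCnt_pos List.mem_cons_self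
    have hcnt : pvCnt (y0 :: t) y0 = pvCnt t y0 + 1 := by
      unfold pvCnt; rw [List.count_cons_self]; push_cast; ring
    have hM0 : 0 ≤ pvM (t.filter (fun y => y ≠ y0)) := pvM_nonneg _
    omega

-- A's update_results is counter's step
theorem pv_update_eq (d : PySem.Dict Int Int) (x : Int) :
    updateResults d x = d.insert x (d.getD x 0 + 1) := by
  unfold updateResults
  by_cases h : d.contains x = false
  · rw [if_pos h, PySem.Dict.getD_of_not_contains d 0 h]
    norm_num
  · rw [if_neg h]

-- A's per-index double update is a fold of update_results over the flattened pieces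
theorem pv_dict_flat (zs : List (Int × Int)) : ∀ (d : PySem.Dict Int Int),
    zs.foldl (fun d p =>
      let d1 := updateResults d p.1
      if p.1 ≠ p.2 then updateResults d1 p.2 else d1) d
    = (zs.flatMap pvPiece).foldl updateResults d := by
  induction zs with
  | nil => intro d; rfl
  | cons p zs ih =>
    intro d
    rw [List.foldl_cons, List.flatMap_cons, List.foldl_append, ih]
    congr 1
    unfold pvPiece
    by_cases h : p.1 = p.2 <;> simp [h]

-- B's builder loop flattens the same pieces
theorem pv_items_flat (zs : List (Int × Int)) :
    zs.foldl (fun acc (p : Int × Int) =>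
      let acc := acc ++ [p.1]
      if p.1 ≠ p.2 then acc ++ [p.2] else acc) []
    = zs.flatMap pvPiece := by
  have hbody : (fun acc (p : Int × Int) =>
      let acc := acc ++ [p.1]
      if p.1 ≠ p.2 then acc ++ [p.2] else acc)
      = fun acc (p : Int × Int) => acc ++ pvPiece p := by
    funext acc p
    unfold pvPiece
    by_cases h : p.1 = p.2 <;> simp [h]
  rw [hbody, PySem.List.foldl_append_eq_flatMap]
  simp

-- the index loop over range(len(A)) is a fold over zip(A, B) when len(A) ≤ len(B)
theorem pv_range_zip {α : Type} (A B : List Int) (hlen : A.length ≤ B.length)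
    (F : Int → Int → α → α) (init : α) :
    (PySem.List.pyRange 0 (A.length : Int) 1).foldl
        (fun d i => F (PySem.List.pyGetD A i 0) (PySem.List.pyGetD B i 0) d) init
    = (A.zip B).foldl (fun d p => F p.1 p.2 d) init := by
  have hzip : (List.range A.length).map
      (fun k => (A.getD k 0, B.getD k 0)) = A.zip B := by
    apply List.ext_getElem
    · simp; omega
    · intro k hk1 hk2
      have hkA : k < A.length := by simpa using hk1
      have hkB : k < B.length := lt_of_lt_of_le hkA hlen
      simp only [List.getElem_map, List.getElem_range, List.getElem_zip]
      rw [List.getD_eq_getElem _ _ hkA, List.getD_eq_getElem _ _ hkB]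
  rw [PySem.List.pyRange_one, List.foldl_map]
  conv_rhs => rw [← hzip, List.foldl_map]
  rw [show (((A.length : Int) - 0).toNat) = A.length by omega]
  apply PySem.List.foldl_congr_mem
  intro acc k _
  simp

-- A computes the max frequency of the flattened pieces
theorem pv_A_eq_M (A B : List Int) (hA : A ≠ []) (hlen : A.length ≤ B.length) :
    solution A B = pvM ((A.zip B).flatMap pvPiece) := by
  unfold solution
  rw [pv_range_zip A B hlen
    (fun a b d => let d1 := updateResults d a; if a ≠ b then updateResults d1 b else d1)
    PySem.Dict.empty]
  rw [pv_dict_flat]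
  set items := (A.zip B).flatMap pvPiece with hitems
  have hfold : items.foldl updateResults PySem.Dict.empty = PySem.Dict.counter items := by
    rw [show (updateResults : PySem.Dict Int Int → Int → PySem.Dict Int Int)
        = fun d x => d.insert x (d.getD x 0 + 1) from funext fun d => funext fun x => pv_update_eq d x]
    exact PySem.Dict.foldl_insert_getD_add_one_eq_counter items
  rw [hfold]
  have hvals : (PySem.Dict.counter items).values
      = (PySem.Set.ofList items).map (fun k => ((items.count k : Int))) := by
    rw [PySem.Dict.values_eq_map_keys _ (PySem.Dict.nodup_keys_counter items) 0,
        PySem.Dict.keys_counter]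
    apply List.map_congr_left
    intro k _
    exact PySem.Dict.getD_counter items k
  -- items is nonempty
  obtain ⟨a, A', rfl⟩ := List.exists_cons_of_ne_nil hA
  obtain ⟨b, B', rfl⟩ : ∃ b B', B = b :: B' := by
    cases B with
    | nil => simp at hlen
    | cons b B' => exact ⟨b, B', rfl⟩
  have hmem_items : a ∈ items := by
    rw [hitems]
    simp [List.zip_cons_cons, pvPiece]
  have hne : (PySem.Set.ofList items).map (fun k => ((items.count k : Int))) ≠ [] := by
    simp only [ne_eq, List.map_eq_nil_iff]
    intro hnil
    have := Iff.mpr (PySem.Set.mem_ofList _ _) hmem_items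
    rw [hnil] at this
    exact absurd this (List.not_mem_nil)
  show (match PySem.List.max? (PySem.Dict.counter items).values (fun x => x) with
    | some m => m | none => 0) = pvM items
  rw [hvals]
  obtain ⟨v0, vrest, hv⟩ := List.exists_cons_of_ne_nil hne
  rw [hv, PySem.List.max?_id_cons]
  show vrest.foldl max v0 = pvM items
  -- v0 is a positive count
  have hv0pos : 1 ≤ v0 := by
    have : v0 ∈ (PySem.Set.ofList items).map (fun k => ((items.count k : Int))) := by
      rw [hv]; exact List.mem_cons_self
    rcases List.mem_map.mp this with ⟨k, hk, rfl⟩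
    exact pvCnt_pos (Iff.mp (PySem.Set.mem_ofList _ _) hk)
  have hfold0 : vrest.foldl max v0 = (v0 :: vrest).foldl max 0 := by
    rw [List.foldl_cons]
    congr 1
    omega
  rw [hfold0, ← hv]
  unfold pvM
  apply pv_maxfold_eq
  · intro v hvv
    rcases List.mem_map.mp hvv with ⟨k, hk, rfl⟩
    left
    exact List.mem_map.mpr ⟨k, Iff.mp (PySem.Set.mem_ofList _ _) hk, rfl⟩
  · intro v hvv
    rcases List.mem_map.mp hvv with ⟨k, hk, rfl⟩
    left
    exact List.mem_map.mpr ⟨k, Iff.mpr (PySem.Set.mem_ofList _ _) hk, rfl⟩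

-- B computes the max frequency of the same flattened pieces
theorem pv_B_eq_M (A B : List Int) (hA : A ≠ []) (hlen : A.length ≤ B.length) :
    solution_alt A B = pvM ((A.zip B).flatMap pvPiece) := by
  unfold solution_alt
  rw [pv_items_flat]
  set items := (A.zip B).flatMap pvPiece with hitems
  have hperm : (PySem.List.sorted items (fun x => x) false).Perm items :=
    PySem.List.sorted_perm items (fun x => x) false
  have hne : items ≠ [] := by
    obtain ⟨a, A', rfl⟩ := List.exists_cons_of_ne_nil hA
    obtain ⟨b, B', rfl⟩ : ∃ b B', B = b :: B' := by
      cases B with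
      | nil => simp at hlen
      | cons b B' => exact ⟨b, B', rfl⟩
    rw [hitems]
    simp [List.zip_cons_cons, pvPiece]
  have hsne : PySem.List.sorted items (fun x => x) false ≠ [] := by
    intro h
    exact hne ((PySem.List.sorted_eq_nil_iff items (fun x => x) false).mp h)
  have hpair : List.Pairwise (· ≤ ·) (PySem.List.sorted items (fun x => x) false) :=
    PySem.List.sorted_pairwise items (fun x => x)
  show ((PySem.List.sorted items (fun x => x) false).foldl pvStep
    ((0 : Int), (0 : Int), (none : Option Int))).1 = pvM items
  rw [pv_scan_sorted _ hpair hsne]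
  exact pvM_perm hperm

-- ===== VERDICT (by name: the statement is the Claim_ definition above) =====
theorem solution_spec : Claim_equal_solution := by
  intro A B _ hpre
  unfold Spec_solution
  rw [pv_A_eq_M A B hpre.1 hpre.2, pv_B_eq_M A B hpre.1 hpre.2]
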